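-- pv_equiv track=rewrite | github.com/MonliH/Reversi-AI | AI_Reversi/reversi.py | checkSandwich
-- ===== SOURCE A (Python) =====
-- n = 8 # board size 8,6,4,2(needs to be even)
--
-- w = -1 # white tile ID
--
-- b = 1 # black tile ID
--
-- def outOfBound(x, y): # if is out of board/bounds
--     return x < 0 or x >= n or y < 0 or y >= n
--
-- def checkSandwich(board, x, y, dx, dy, turn):
--     if dx == 0 and dy == 0:
--         return False
--     if outOfBound(x + dx, y + dy): # out of bound
--         return False
--     if board[x + dx][y + dy] == turn: # sandwiched
--         return True
--     elif board[x + dx][y + dy] == opposite(turn):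
--         return checkSandwich(board, x + dx, y + dy, dx, dy, turn)
--     else: # space is unoccupied
--         return False
--
-- def opposite(turn): # change turn
--     return w if turn == b else b
-- ===== SOURCE B (Python) =====
-- n = 8
--
-- w = -1
--
-- b = 1
--
-- def checkSandwich(board, x, y, dx, dy, turn):
--     if dx == 0 and dy == 0:
--         return False
--     # materialize the line of tile values starting one step away, out to the board edge
--     ray = []
--     i, j = x + dx, y + dy
--     while 0 <= i < n and 0 <= j < n:
--         ray.append(board[i][j])
--         i += dx
--         j += dy
--     opp = w if turn == b else b
--     # a sandwich = the first tile on the ray that is not the opponent's is ours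
--     for k in range(len(ray)):
--         if ray[k] != opp:
--             return ray[k] == turn
--     return False
-- ===== Notes on version B (the rewrite author's own statement) =====
-- stated objective: alternative
-- what changed: Replaces A's step-by-step tail recursion with a two-phase structure: first materialize the list of tile values along the ray until the board edge, then scan that list for the first non-opponent tile.
-- outside the precondition, e.g. on checkSandwich([[0, 0], [0, 0]], -1, -1, 1, 1, 1): A returns False, B raises IndexError
import Mathlib
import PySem

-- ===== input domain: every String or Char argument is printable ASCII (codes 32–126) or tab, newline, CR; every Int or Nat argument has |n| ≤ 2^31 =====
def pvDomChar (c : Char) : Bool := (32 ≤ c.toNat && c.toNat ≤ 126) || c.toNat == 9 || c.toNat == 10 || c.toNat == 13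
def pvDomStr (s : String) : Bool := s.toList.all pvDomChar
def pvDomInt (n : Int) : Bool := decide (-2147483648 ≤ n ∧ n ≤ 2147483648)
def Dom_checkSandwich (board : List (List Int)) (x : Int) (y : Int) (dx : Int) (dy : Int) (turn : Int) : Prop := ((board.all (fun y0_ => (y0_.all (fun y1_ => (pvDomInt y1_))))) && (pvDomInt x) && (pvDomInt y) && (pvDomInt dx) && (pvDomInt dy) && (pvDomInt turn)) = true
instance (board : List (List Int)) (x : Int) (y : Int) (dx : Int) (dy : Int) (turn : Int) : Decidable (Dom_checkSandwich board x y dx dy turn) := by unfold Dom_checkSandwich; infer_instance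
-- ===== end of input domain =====

-- B replaces A's tail recursion by materializing the ray of tile values and scanning it;
-- objective: alternative decomposition (not faster). Pre_ excludes ragged/small boards on which
-- the walk can step onto a row/cell missing from the board and Python A raises IndexError.
-- ===== PORT A =====
def pvOutOfBound (x y : Int) : Bool := x < 0 || x ≥ 8 || y < 0 || y ≥ 8

def pvOpposite (turn : Int) : Int := if turn = 1 then -1 else 1

-- totalized cell read (Python raises off the board; such inputs are outside Pre_)
def pvCellA (board : List (List Int)) (x y : Int) : Int :=
  (PySem.List.pyGet? ((PySem.List.pyGet? board x).getD []) y).getD 0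

def pvMea (x y dx dy : Int) : Nat :=
  if 0 < dx then (8 - x).toNat else if dx < 0 then (x + 8).toNat
  else if 0 < dy then (8 - y).toNat else (y + 8).toNat

def checkSandwich (board : List (List Int)) (x : Int) (y : Int) (dx : Int) (dy : Int) (turn : Int) : Bool :=
  if dx = 0 ∧ dy = 0 then false
  else if pvOutOfBound (x + dx) (y + dy) then false
  else if pvCellA board (x + dx) (y + dy) = turn then true
  else if pvCellA board (x + dx) (y + dy) = pvOpposite turn then
    checkSandwich board (x + dx) (y + dy) dx dy turn
  else false
termination_by pvMea x y dx dy
decreasing_by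
  simp only [pvMea, pvOutOfBound, not_and_or, Bool.or_eq_true, not_or, decide_eq_true_eq,
    not_lt, not_le] at *
  split_ifs <;> omega

-- ===== PORT B =====
def pvCellB (board : List (List Int)) (x y : Int) : Int :=
  (PySem.List.pyGet? ((PySem.List.pyGet? board x).getD []) y).getD 0

-- the while-loop building `ray`: values along the line until it leaves the n×n board
def pvRay (board : List (List Int)) (i j dx dy : Int) (h : ¬(dx = 0 ∧ dy = 0)) : List Int :=
  if 0 ≤ i ∧ i < 8 ∧ 0 ≤ j ∧ j < 8 then
    pvCellB board i j :: pvRay board (i + dx) (j + dy) dx dy h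
  else []
termination_by pvMea i j dx dy
decreasing_by
  simp only [pvMea, not_and_or] at *
  split_ifs <;> omega

-- the for-loop: first tile that is not the opponent's decides (early return)
def pvScan (ray : List Int) (opp turn : Int) : Bool :=
  match ray with
  | [] => false
  | c :: rest => if c ≠ opp then c == turn else pvScan rest opp turn

def checkSandwich_alt (board : List (List Int)) (x : Int) (y : Int) (dx : Int) (dy : Int) (turn : Int) : Bool :=
  if h : dx = 0 ∧ dy = 0 then false
  else pvScan (pvRay board (x + dx) (y + dy) dx dy h) (if turn = 1 then -1 else 1) turn

-- ===== PRECONDITION & SPEC =====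
-- Pre_ excludes exactly the questionable boards: when the walk actually reads a cell, a board
-- with fewer than 8 rows or a row shorter than 8 may make Python A raise IndexError; trivially
-- returning inputs (zero direction, first step out of bound) are admitted for any board.
def Pre_checkSandwich (board : List (List Int)) (x : Int) (y : Int) (dx : Int) (dy : Int) (turn : Int) : Prop :=
  (dx = 0 ∧ dy = 0) ∨ (x + dx < 0 ∨ 8 ≤ x + dx ∨ y + dy < 0 ∨ 8 ≤ y + dy) ∨
  (8 ≤ board.length ∧ ∀ row ∈ board, 8 ≤ row.length)
instance (board : List (List Int)) (x : Int) (y : Int) (dx : Int) (dy : Int) (turn : Int) : Decidable (Pre_checkSandwich board x y dx dy turn) := by unfold Pre_checkSandwich; infer_instance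

def pvWitness_checkSandwich : List (List Int) × Int × Int × Int × Int × Int :=
  ([[0,0,0,0,0,0,0,0],[0,0,0,0,0,0,0,0],[0,0,0,0,0,0,0,0],[0,0,0,0,0,0,0,0],
    [0,0,0,0,0,0,0,0],[0,0,0,0,0,0,0,0],[0,0,0,0,0,0,0,0],[0,0,0,0,0,0,0,0]], 0, 0, 1, 0, 1)


-- ===== PORT B =====
-- ===== PRECONDITION & SPEC =====
def Spec_checkSandwich (board : List (List Int)) (x : Int) (y : Int) (dx : Int) (dy : Int) (turn : Int) (out : Bool) : Prop := out = checkSandwich_alt board x y dx dy turn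
instance (board : List (List Int)) (x : Int) (y : Int) (dx : Int) (dy : Int) (turn : Int) (out : Bool) : Decidable (Spec_checkSandwich board x y dx dy turn out) := by unfold Spec_checkSandwich; infer_instance

-- ===== CLAIM (what is proved, stated in full; the proofs are below) =====
def Claim_equal_checkSandwich : Prop := ∀ (board : List (List Int)) (x : Int) (y : Int) (dx : Int) (dy : Int) (turn : Int), Dom_checkSandwich board x y dx dy turn → Pre_checkSandwich board x y dx dy turn → Spec_checkSandwich board x y dx dy turn (checkSandwich board x y dx dy turn)

-- ===== LEMMAS AND PROOFS =====


theorem pvOpp_ne (turn : Int) : (if turn = 1 then (-1 : Int) else 1) ≠ turn := by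
  split_ifs with h <;> omega

theorem pv_main (board : List (List Int)) (dx dy turn : Int) (h : ¬(dx = 0 ∧ dy = 0)) :
    ∀ (x y : Int),
      checkSandwich board x y dx dy turn
        = pvScan (pvRay board (x + dx) (y + dy) dx dy h) (if turn = 1 then -1 else 1) turn := by
  intro x y
  induction hm : pvMea x y dx dy using Nat.strong_induction_on generalizing x y with
  | _ m ih =>
    rw [checkSandwich, pvRay]
    have hb : pvOutOfBound (x + dx) (y + dy) = true ↔
        ¬(0 ≤ x + dx ∧ x + dx < 8 ∧ 0 ≤ y + dy ∧ y + dy < 8) := by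
      simp [pvOutOfBound]; omega
    by_cases hoob : pvOutOfBound (x + dx) (y + dy) = true
    · rw [if_neg h, if_pos hoob, if_neg (hb.mp hoob), pvScan]
    · have hin : 0 ≤ x + dx ∧ x + dx < 8 ∧ 0 ≤ y + dy ∧ y + dy < 8 := by
        by_contra hc; exact hoob (hb.mpr hc)
      rw [if_neg h, if_neg (by simp [hoob]), if_pos hin]
      have hcell : pvCellA board (x + dx) (y + dy) = pvCellB board (x + dx) (y + dy) := rfl
      by_cases h1 : pvCellA board (x + dx) (y + dy) = turn
      · rw [if_pos h1, pvScan]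
        have hne : pvCellB board (x + dx) (y + dy) ≠ (if turn = 1 then -1 else 1) := by
          rw [← hcell, h1]; exact Ne.symm (pvOpp_ne turn)
        rw [if_pos hne, ← hcell, h1]
        simp
      · rw [if_neg h1]
        by_cases h2 : pvCellA board (x + dx) (y + dy) = pvOpposite turn
        · rw [if_pos h2, pvScan]
          have heq : pvCellB board (x + dx) (y + dy) = (if turn = 1 then -1 else 1) := by
            rw [← hcell, h2]; rfl
          rw [if_neg (by simp [heq])]
          have hdec : pvMea (x + dx) (y + dy) dx dy < m := by
            subst hm
            simp only [pvMea, not_and_or] at *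
            split_ifs <;> omega
          have := ih _ hdec (x + dx) (y + dy) rfl
          rw [this]
        · rw [if_neg h2, pvScan]
          have hne : pvCellB board (x + dx) (y + dy) ≠ (if turn = 1 then -1 else 1) := by
            rw [← hcell]; intro hc; apply h2; rw [hc]; rfl
          rw [if_pos hne, ← hcell]
          simp [h1]

-- ===== VERDICT (by name: the statement is the Claim_ definition above) =====
theorem checkSandwich_spec : Claim_equal_checkSandwich := by
  intro board x y dx dy turn _ _
  unfold Spec_checkSandwich checkSandwich_alt
  split
  · next hg => rw [checkSandwich, if_pos hg]
  · next hg => exact pv_main board dx dy turn hg x y
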